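-- pv_equiv track=rewrite | github.com/AlexisGeorgiou/aueb-coding | 1st Semester/Introduction to Programming with Python/hw3/hw3.py | korakize
-- ===== SOURCE A (Python) =====
-- def korakize(sentence):
--     """Metafrazei sta korakistika.
--
--     sentence -- string pou 8a metafrastei
--
--     Epistrefei string metafrasmeno sta korakistika.
--
--     Paradeigmata:
--
--     >>> korakize('Kalimera')
--     'Kakalikamekaraka'
--     >>> korakize('Maria')
--     'Makarikaaka'
--     >>> korakize('Kalimera Maria')
--     'Kakalikamekaraka Makarikaaka'
--     >>> korakize('Na zi kanis i na min zi')
--     'Naka zika kakanikaska ika naka mikanka zika'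
--     """
--     """GRAPSTE TON KWDIKA SAS APO KATW."""
--     output = ''
--     for word in sentence.split():
--         new_word = ''
--         for a in range(0,len(word),2):
--             if a == len(word) - 1:
--                 new_word += word[a] + 'ka'
--             else:
--                 new_word +=  word[a] + word[a+1] + 'ka'
--
--         output += new_word + ' '
--
--     return output[:len(output)-1]
-- ===== SOURCE B (Python) =====
-- def _kor(word):
--     parts = []
--     while word:
--         parts.append(word[:2] + 'ka')
--         word = word[2:]
--     return ''.join(parts)
--
--
-- def korakize(sentence):
--     return ' '.join(_kor(word) for word in sentence.split())
-- ===== Notes on version B (the rewrite author's own statement) =====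
-- stated objective: simpler
-- what changed: Replaces the indexed range(0,len,2) loop with its last-character special case and the accumulate-then-trim-trailing-space output by slice-chunking each word two characters at a time in a while loop (word[:2]/word[2:], which handles the odd tail for free) and assembling the result with a space join.
import Mathlib
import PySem

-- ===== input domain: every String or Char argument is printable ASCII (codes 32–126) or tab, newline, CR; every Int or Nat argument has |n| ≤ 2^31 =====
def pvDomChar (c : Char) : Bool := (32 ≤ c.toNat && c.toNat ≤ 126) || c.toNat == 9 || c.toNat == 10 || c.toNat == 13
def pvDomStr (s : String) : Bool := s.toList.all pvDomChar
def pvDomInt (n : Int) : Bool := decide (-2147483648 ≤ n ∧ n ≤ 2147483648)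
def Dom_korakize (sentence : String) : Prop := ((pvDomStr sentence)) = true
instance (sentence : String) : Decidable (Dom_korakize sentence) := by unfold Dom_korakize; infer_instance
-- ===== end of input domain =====

-- B chunks each word two characters at a time with slices (the odd tail falls out of the
-- clamped slice) and assembles the output with ' '.join, instead of A's indexed range(0,len,2)
-- loop with a last-character special case and trailing-space trim; simpler shape, not faster.


-- ===== PORT A =====
-- A, step for step: for word in sentence.split(): for a in range(0, len(word), 2): append
-- word[a](+word[a+1])+'ka'; then output += new_word + ' ', and return output[:len(output)-1].
-- word[a]/word[a+1] are always in range where A reads them, so the total pyGetD is exact.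
def korakize (sentence : String) : String :=
  let output := (PySem.Str.split₀ sentence).foldl (fun output word =>
    let w := word.toList
    let new_word := (PySem.List.pyRange 0 (PySem.List.len w) 2).foldl (fun nw a =>
      if a = PySem.List.len w - 1 then
        nw ++ ([PySem.List.pyGetD w a ' '] ++ ['k', 'a'])
      else
        nw ++ ([PySem.List.pyGetD w a ' '] ++ [PySem.List.pyGetD w (a + 1) ' '] ++ ['k', 'a'])) []
    output ++ (new_word ++ [' '])) []
  String.ofList (PySem.List.slice output none (some (PySem.List.len output - 1)))

-- ===== PORT B =====
-- Source B's _kor while loop: parts.append(word[:2] + 'ka'); word = word[2:]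
-- (the slices word[:2] / word[2:] are exactly clamped take 2 / drop 2)
def korParts (w : List Char) : List (List Char) :=
  if _h : w = [] then []
  else (w.take 2 ++ ['k', 'a']) :: korParts (w.drop 2)
termination_by w.length
decreasing_by
  cases w with
  | nil => exact absurd rfl _h
  | cons c cs => simp

-- Source B's korakize: ' '.join(_kor(word) for word in sentence.split()), with _kor = ''.join(parts)
def korakize_alt (sentence : String) : String :=
  PySem.Str.join " " ((PySem.Str.split₀ sentence).map
    (fun word => String.ofList (PySem.Chars.join [] (korParts word.toList))))

-- ===== PRECONDITION & SPEC =====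
def Spec_korakize (sentence : String) (out : String) : Prop := out = korakize_alt sentence
instance (sentence : String) (out : String) : Decidable (Spec_korakize sentence out) := by unfold Spec_korakize; infer_instance

-- ===== CLAIM (what is proved, stated in full; the proofs are below) =====
def Claim_equal_korakize : Prop := ∀ (sentence : String), Dom_korakize sentence → Spec_korakize sentence (korakize sentence)

-- ===== LEMMAS AND PROOFS =====

-- ''.join peels one part at a time
theorem join_nil_cons (p : List Char) (ps : List (List Char)) :
    PySem.Chars.join [] (p :: ps) = p ++ PySem.Chars.join [] ps := by
  cases ps with
  | nil => simp [PySem.Chars.join_singleton, PySem.Chars.join_nil]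
  | cons q rest => simp [PySem.Chars.join_cons_cons]

-- the block A's inner loop appends for word w at index a
def korBlock (w : List Char) (a : Int) : List Char :=
  if a = PySem.List.len w - 1 then
    [PySem.List.pyGetD w a ' '] ++ ['k', 'a']
  else
    [PySem.List.pyGetD w a ' '] ++ [PySem.List.pyGetD w (a + 1) ' '] ++ ['k', 'a']

-- range(0, len(w), 2) lists the even positions 2*k, k < (len+1)/2
theorem range_expand (w : List Char) :
    PySem.List.pyRange 0 (PySem.List.len w) 2
      = (List.range ((w.length + 1) / 2)).map (fun k => ((2 * k : Nat) : Int)) := by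
  rw [PySem.List.len_eq, PySem.List.pyRange_of_pos _ _ (by norm_num)]
  rcases Nat.eq_zero_or_pos w.length with h | h
  · simp [h]
  · have h1 : ((0 : Int) < w.length) := by exact_mod_cast h
    have h2 : (((w.length : Int) - 0 + 2 - 1) / 2).toNat = (w.length + 1) / 2 := by omega
    rw [if_pos h1, h2]
    apply List.map_congr_left
    intro k _
    push_cast; ring

-- dropping the leading pair shifts A's block two places
theorem korBlock_shift (c1 c2 : Char) (rest : List Char) (k : Nat) :
    korBlock (c1 :: c2 :: rest) ((2 * (k + 1) : Nat) : Int) = korBlock rest ((2 * k : Nat) : Int) := by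
  unfold korBlock
  have hcond : (((2 * (k + 1) : Nat) : Int) = PySem.List.len (c1 :: c2 :: rest) - 1)
      ↔ (((2 * k : Nat) : Int) = PySem.List.len rest - 1) := by
    simp [PySem.List.len_eq]; omega
  have e2 : ((2 * (k + 1) : Nat) : Int) + 1 = ((2 * k + 3 : Nat) : Int) := by push_cast; ring
  have e4 : ((2 * k : Nat) : Int) + 1 = ((2 * k + 1 : Nat) : Int) := by push_cast; ring
  rw [e2, e4]
  have e1 : (2 * (k + 1) : Nat) = 2 * k + 2 := by omega
  rw [e1]
  by_cases h : ((2 * k : Nat) : Int) = PySem.List.len rest - 1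
  · rw [if_pos (by rw [← e1]; exact hcond.mpr h), if_pos h]
    simp only [PySem.List.pyGetD_natCast]
    simp [List.getD]
  · rw [if_neg (by rw [← e1]; exact fun hh => h (hcond.mp hh)), if_neg h]
    simp only [PySem.List.pyGetD_natCast]
    simp [List.getD]

-- A's inner loop over the even positions of w produces exactly B's chunking of w
theorem inner_eq (w : List Char) :
    List.flatMap (fun k => korBlock w ((2 * k : Nat) : Int)) (List.range ((w.length + 1) / 2))
      = PySem.Chars.join [] (korParts w) := by
  induction w using korParts.induct with
  | case1 => simp [korParts, PySem.Chars.join_nil]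
  | case2 w hw ih =>
      rw [korParts, dif_neg hw, join_nil_cons, ← ih]
      cases w with
      | nil => exact absurd rfl hw
      | cons c1 cs =>
        cases cs with
        | nil =>
            simp only [List.length_cons, List.length_nil]
            norm_num
            simp [korBlock, PySem.List.len_eq, PySem.List.pyGetD_natCast, List.getD,
                  korParts, PySem.Chars.join_nil]
        | cons c2 rest =>
            have hlen : ((c1 :: c2 :: rest).length + 1) / 2 = (rest.length + 1) / 2 + 1 := by
              simp; omega
            rw [hlen, List.range_succ_eq_map, List.flatMap_cons, List.flatMap_map]
            have hdrop : (c1 :: c2 :: rest).drop 2 = rest := rfl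
            rw [hdrop]
            congr 1
            · have h0 : ¬ ((0 : Int) = PySem.List.len (c1 :: c2 :: rest) - 1) := by
                simp [PySem.List.len_eq]; omega
              simp only [Nat.mul_zero, Nat.cast_zero, korBlock, h0, if_false]
              simp [PySem.List.pyGetD_natCast, List.getD]
              rw [show (1 : Int) = ((1 : Nat) : Int) by norm_num, PySem.List.pyGetD_natCast]
              rfl
            · exact List.flatMap_congr (fun k _ => by
                have hs : Nat.succ k = k + 1 := rfl
                rw [hs, korBlock_shift])

-- output[:len(output)-1] is dropLast
theorem slice_trim (xs : List Char) :
    PySem.List.slice xs none (some (PySem.List.len xs - 1)) = xs.dropLast := by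
  cases xs with
  | nil => simp [PySem.List.slice_to_neg_one]
  | cons c cs =>
      have h : PySem.List.len (c :: cs) - 1 = ((cs.length : Int)) := by
        simp [PySem.List.len_eq]
      rw [h, PySem.List.slice_to_natCast]
      simp [List.dropLast_eq_take]

-- concatenating blocks each terminated by ' ' and dropping the final char is ' '.join
theorem flat_drop_eq_join (ps : List (List Char)) :
    (List.flatMap (fun p => p ++ [' ']) ps).dropLast = PySem.Chars.join [' '] ps := by
  induction ps with
  | nil => simp [PySem.Chars.join_nil]
  | cons p ps ih =>
      cases ps with
      | nil => simp [PySem.Chars.join_singleton]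
      | cons q rest =>
          have hne : List.flatMap (fun p => p ++ [' ']) (q :: rest) ≠ [] := by
            simp [List.flatMap_cons]
          rw [List.flatMap_cons, PySem.Chars.join_cons_cons,
              List.dropLast_append_of_ne_nil hne, ih]

-- the same, through a per-word map
theorem flat_drop_eq_join' (f : String → List Char) (ws : List String) :
    (List.flatMap (fun w => f w ++ [' ']) ws).dropLast = PySem.Chars.join [' '] (ws.map f) := by
  rw [← flat_drop_eq_join, List.flatMap_map]

-- A's whole inner foldl, as written in the port, equals B's chunking
theorem inner_fold_eq (word : String) :
    (PySem.List.pyRange 0 (PySem.List.len word.toList) 2).foldl (fun nw a =>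
      if a = PySem.List.len word.toList - 1 then
        nw ++ ([PySem.List.pyGetD word.toList a ' '] ++ ['k', 'a'])
      else
        nw ++ ([PySem.List.pyGetD word.toList a ' ']
               ++ [PySem.List.pyGetD word.toList (a + 1) ' '] ++ ['k', 'a'])) []
      = PySem.Chars.join [] (korParts word.toList) := by
  have hstep : (fun (nw : List Char) (a : Int) =>
      if a = PySem.List.len word.toList - 1 then
        nw ++ ([PySem.List.pyGetD word.toList a ' '] ++ ['k', 'a'])
      else
        nw ++ ([PySem.List.pyGetD word.toList a ' ']
               ++ [PySem.List.pyGetD word.toList (a + 1) ' '] ++ ['k', 'a']))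
      = (fun nw a => nw ++ korBlock word.toList a) := by
    funext nw a; unfold korBlock; split <;> rfl
  rw [hstep, PySem.List.foldl_append_eq_flatMap, List.nil_append, range_expand,
      List.flatMap_map]
  exact inner_eq word.toList

-- ===== VERDICT (by name: the statement is the Claim_ definition above) =====
theorem korakize_spec : Claim_equal_korakize := by
  intro sentence _
  show korakize sentence = korakize_alt sentence
  simp only [korakize, korakize_alt]
  have hstep : (fun (output : List Char) (word : String) =>
      output ++ ((PySem.List.pyRange 0 (PySem.List.len word.toList) 2).foldl (fun nw a =>
        if a = PySem.List.len word.toList - 1 then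
          nw ++ ([PySem.List.pyGetD word.toList a ' '] ++ ['k', 'a'])
        else
          nw ++ ([PySem.List.pyGetD word.toList a ' ']
                 ++ [PySem.List.pyGetD word.toList (a + 1) ' '] ++ ['k', 'a'])) [] ++ [' ']))
      = (fun output word =>
          output ++ (PySem.Chars.join [] (korParts word.toList) ++ [' '])) := by
    funext output word
    rw [inner_fold_eq word]
  rw [hstep, PySem.List.foldl_append_eq_flatMap, List.nil_append, slice_trim,
      flat_drop_eq_join' (fun word => PySem.Chars.join [] (korParts word.toList))]
  conv_rhs => rw [← String.ofList_toList (s := PySem.Str.join _ _)]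
  apply congrArg String.ofList
  rw [PySem.Str.toList_join, List.map_map]
  have hmap : (String.toList ∘ fun word => String.ofList (PySem.Chars.join [] (korParts word.toList)))
      = fun word : String => PySem.Chars.join [] (korParts word.toList) := by
    funext word
    simp [Function.comp, String.toList_ofList]
  rw [hmap, show (" " : String).toList = [' '] from rfl]
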